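-- pv_equiv track=rewrite | github.com/ColdCode0214/LeetCode_local | 1417-重新格式化字符串.py | reformat
-- ===== SOURCE A (Python) =====
-- def reformat(s: str) -> str:
--     n = len(s)
--     num_digit = 0
--     letter, digit, ans = "", "", ""
--     for i in range(n):
--         if s[i].isdigit():
--             digit += s[i]
--         else:
--             letter += s[i]
--     if abs(len(digit) - len(letter)) > 1: return ""
--     i1, i2 = 0, 0
--     if len(letter) > len(digit):
--         while i2 < len(digit):
--             ans += letter[i1]
--             ans += digit[i2]
--             i1 += 1
--             i2 += 1
--         ans += letter[i1]
--     else: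
--         while i1 < len(letter):
--             ans += digit[i2]
--             ans += letter[i1]
--             i1 += 1
--             i2 += 1
--         if len(letter) != len(digit):
--             ans += digit[i2]
--     return ans
-- ===== SOURCE B (Python) =====
-- def reformat(s: str) -> str:
--     digit = [c for c in s if c.isdigit()]
--     letter = [c for c in s if not c.isdigit()]
--     if abs(len(digit) - len(letter)) > 1:
--         return ""
--     res = [None] * len(s)
--     if len(digit) >= len(letter):
--         res[::2] = digit
--         res[1::2] = letter
--     else:
--         res[::2] = letter
--         res[1::2] = digit
--     return "".join(res)
-- ===== Notes on version B (the rewrite author's own statement) =====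
-- stated objective: simpler
-- what changed: Replaced the two index-driven while loops (manual i1/i2 cursors, char-by-char appends, trailing-element special cases) by a single strided scatter: partition with comprehensions, then assign the larger group to even positions and the smaller to odd positions via slice assignment and join.
import Mathlib
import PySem

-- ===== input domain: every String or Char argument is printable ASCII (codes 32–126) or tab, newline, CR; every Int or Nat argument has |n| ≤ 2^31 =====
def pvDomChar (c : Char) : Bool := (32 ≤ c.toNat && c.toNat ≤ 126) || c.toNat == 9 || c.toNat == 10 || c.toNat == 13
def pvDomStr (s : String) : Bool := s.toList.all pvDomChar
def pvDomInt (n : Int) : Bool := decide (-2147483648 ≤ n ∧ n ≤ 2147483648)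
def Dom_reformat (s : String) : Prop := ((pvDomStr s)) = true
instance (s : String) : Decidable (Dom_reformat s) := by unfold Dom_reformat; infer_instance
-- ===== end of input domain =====

-- B replaces A's two index-driven while loops by a single strided scatter (larger group
-- to even positions, smaller to odd) for simplicity; same O(n) cost, same return values.

-- ===== PORT A =====
-- while i2 < len(digit): ans += letter[i1]; ans += digit[i2]; …  then ans += letter[i1]
def reformatLoopLetter (letter digit : List Char) (i1 i2 : Nat) (ans : List Char) : List Char :=
  if _h : i2 < digit.length then
    reformatLoopLetter letter digit (i1 + 1) (i2 + 1) (ans ++ [letter.getD i1 ' '] ++ [digit.getD i2 ' '])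
  else ans ++ [letter.getD i1 ' ']
termination_by digit.length - i2

-- while i1 < len(letter): ans += digit[i2]; ans += letter[i1]; …  then the trailing digit if lengths differ
def reformatLoopDigit (letter digit : List Char) (i1 i2 : Nat) (ans : List Char) : List Char :=
  if _h : i1 < letter.length then
    reformatLoopDigit letter digit (i1 + 1) (i2 + 1) (ans ++ [digit.getD i2 ' '] ++ [letter.getD i1 ' '])
  else if letter.length ≠ digit.length then ans ++ [digit.getD i2 ' '] else ans

def reformat (s : String) : String :=
  let cs := s.toList
  -- for i in range(n): if s[i].isdigit(): digit += s[i] else: letter += s[i]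
  let p := cs.foldl (fun (acc : List Char × List Char) c =>
      if PySem.Chars.isdigit c then (acc.1, acc.2 ++ [c]) else (acc.1 ++ [c], acc.2)) ([], [])
  let letter := p.1
  let digit := p.2
  if ((digit.length : Int) - (letter.length : Int)).natAbs > 1 then ""
  else if letter.length > digit.length then String.mk (reformatLoopLetter letter digit 0 0 [])
  else String.mk (reformatLoopDigit letter digit 0 0 [])

-- ===== PORT B =====
-- res[::2] = big; res[1::2] = small  (the strided scatter: big at even indices, small at odd)
def scatterEvenOdd : List Char → List Char → List Char
  | [], small => small
  | b :: big, small => b :: scatterEvenOdd small big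
termination_by big small => big.length + small.length

def reformat_alt (s : String) : String :=
  let cs := s.toList
  let digit := cs.filter PySem.Chars.isdigit
  let letter := cs.filter (fun c => !PySem.Chars.isdigit c)
  if ((digit.length : Int) - (letter.length : Int)).natAbs > 1 then ""
  else if digit.length ≥ letter.length then String.mk (scatterEvenOdd digit letter)
  else String.mk (scatterEvenOdd letter digit)

-- ===== PRECONDITION & SPEC =====
def Spec_reformat (s : String) (out : String) : Prop := out = reformat_alt s
instance (s : String) (out : String) : Decidable (Spec_reformat s out) := by unfold Spec_reformat; infer_instance

-- ===== CLAIM (what is proved, stated in full; the proofs are below) =====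
def Claim_equal_reformat : Prop := ∀ (s : String), Dom_reformat s → Spec_reformat s (reformat s)

-- ===== LEMMAS AND PROOFS =====

theorem foldl_partition (cs a b : List Char) :
    cs.foldl (fun (acc : List Char × List Char) c =>
      if PySem.Chars.isdigit c then (acc.1, acc.2 ++ [c]) else (acc.1 ++ [c], acc.2)) (a, b)
    = (a ++ cs.filter (fun c => !PySem.Chars.isdigit c), b ++ cs.filter PySem.Chars.isdigit) := by
  induction cs generalizing a b with
  | nil => simp
  | cons c cs ih =>
    by_cases h : PySem.Chars.isdigit c = true <;> simp [List.foldl_cons, h, ih]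

theorem loopLetter_eq (letter digit : List Char)
    (hlen : letter.length = digit.length + 1) :
    ∀ i ans, i ≤ digit.length →
      reformatLoopLetter letter digit i i ans
        = ans ++ scatterEvenOdd (letter.drop i) (digit.drop i) := by
  intro i
  induction hk : digit.length - i generalizing i with
  | zero =>
    intro ans hi
    have hieq : i = digit.length := by omega
    subst hieq
    rw [reformatLoopLetter]
    have hd : digit.drop digit.length = [] := by simp
    have hl : letter.drop digit.length = [letter.getD digit.length ' '] := by
      have h1 : digit.length < letter.length := by omega
      rw [List.drop_eq_getElem_cons h1]
      have : letter.drop (digit.length + 1) = [] := by simp [hlen]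
      simp [this, List.getD, List.getElem?_eq_getElem h1]
    simp [hd, hl, scatterEvenOdd]

  | succ k ih =>
    intro ans hi
    have h1 : i < digit.length := by omega
    have h2 : i < letter.length := by omega
    rw [reformatLoopLetter]
    simp only [dif_pos h1]
    rw [ih (i + 1) (by omega) _ (by omega)]
    rw [List.drop_eq_getElem_cons h2, List.drop_eq_getElem_cons h1]
    simp only [scatterEvenOdd]
    simp [List.getD, List.getElem?_eq_getElem h1, List.getElem?_eq_getElem h2]

theorem loopDigit_eq (letter digit : List Char)
    (hlen : letter.length ≤ digit.length) (hlen2 : digit.length ≤ letter.length + 1) :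
    ∀ i ans, i ≤ letter.length →
      reformatLoopDigit letter digit i i ans
        = ans ++ scatterEvenOdd (digit.drop i) (letter.drop i) := by
  intro i
  induction hk : letter.length - i generalizing i with
  | zero =>
    intro ans hi
    have hieq : i = letter.length := by omega
    subst hieq
    rw [reformatLoopDigit]
    have hl : letter.drop letter.length = [] := by simp
    by_cases hne : letter.length = digit.length
    · have hd : digit.drop digit.length = [] := by simp
      simp only [hne, hd, scatterEvenOdd]
      simp [hne]
    · have h1 : letter.length < digit.length := by omega
      have hd : digit.drop letter.length = [digit.getD letter.length ' '] := by
        rw [List.drop_eq_getElem_cons h1]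
        have : digit.drop (letter.length + 1) = [] := by
          have : digit.length = letter.length + 1 := by omega
          simp [this]
        simp [this, List.getD, List.getElem?_eq_getElem h1]
      simp [hd, hl, scatterEvenOdd, hne]
  | succ k ih =>
    intro ans hi
    have h1 : i < letter.length := by omega
    have h2 : i < digit.length := by omega
    rw [reformatLoopDigit]
    simp only [dif_pos h1]
    rw [ih (i + 1) (by omega) _ (by omega)]
    rw [List.drop_eq_getElem_cons h2, List.drop_eq_getElem_cons h1]
    simp only [scatterEvenOdd]
    simp [List.getD, List.getElem?_eq_getElem h1, List.getElem?_eq_getElem h2]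

-- ===== VERDICT (by name: the statement is the Claim_ definition above) =====
theorem reformat_spec : Claim_equal_reformat := by
  intro s _
  unfold Spec_reformat reformat reformat_alt
  simp only [foldl_partition, List.nil_append]
  set letter := s.toList.filter (fun c => !PySem.Chars.isdigit c) with hL
  set digit := s.toList.filter PySem.Chars.isdigit with hD
  by_cases hg : ((digit.length : Int) - (letter.length : Int)).natAbs > 1
  · simp [hg]
  · simp only [if_neg hg]
    by_cases hlt : letter.length > digit.length
    · have hne : ¬ digit.length ≥ letter.length := by omega
      have hlen : letter.length = digit.length + 1 := by omega
      simp only [if_pos hlt, if_neg hne]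
      rw [loopLetter_eq letter digit hlen 0 [] (by omega)]
      simp
    · have hge : digit.length ≥ letter.length := by omega
      have h2 : digit.length ≤ letter.length + 1 := by omega
      simp only [if_neg hlt, if_pos hge]
      rw [loopDigit_eq letter digit (by omega) h2 0 [] (by omega)]
      simp
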